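-- pv_equiv track=rewrite | github.com/aKaidalov/iti0102-2022 | EX/ex03_idcode/idcode.py | is_valid_day_number
-- ===== SOURCE A (Python) =====
-- def is_valid_gender_number(gender_number: int):
--     """Check if given value is correct for gender number in ID code."""
--     if gender_number < 1 or gender_number > 6:
--         return False
--     else:
--         return True
--
-- def is_valid_year_number(year_number: int) -> bool:
--     """Check if given value is correct for year number in ID code."""
--     if -1 < year_number < 100:
--         return True
--     return False
--
-- def is_valid_month_number(month_number: int) -> bool:
--     """Check if given value is correct for month number in ID code."""
--     if 0 < month_number < 13:
--         return True
--     return False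
--
-- def is_leap_year(year_number: int):
--     """Define the leap year."""
--     if year_number % 400 == 0:
--         return True
--     if year_number % 4 == 0 and not year_number % 100 == 0:
--         return True
--     if year_number % 100 == 0 and year_number % 400 != 0:
--         return False
--     return False
--
-- def get_full_year(gender_number: int, year_number: int) -> int:
--     """Define the 4-digit year when given person was born."""
--     if gender_number == 1 or gender_number == 2:
--         return 1800 + year_number
--     if gender_number == 3 or gender_number == 4:
--         return 1900 + year_number
--     if gender_number == 5 or gender_number == 6:
--         return 2000 + year_number
--
-- def is_valid_day_number(gender_number: int, year_number: int, month_number: int, day_number: int) -> bool: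
--     """Check if given value is correct for day number in ID code."""
--     if is_valid_gender_number(gender_number) and is_valid_year_number(year_number) and is_valid_month_number(month_number):
--         # Previous line checks if all the numbers are correct.
--         days_in_month_31 = [1, 3, 5, 7, 8, 10, 12]
--         days_in_month_30 = [4, 6, 9, 11]
--         for element in range(len(days_in_month_31)):
--             if month_number == days_in_month_31[element] and 0 < day_number < 32:
--                 return True
--         for element in range(len(days_in_month_30)):
--             if month_number == days_in_month_30[element] and 0 < day_number < 31:
--                 return True
--         year_in_4_numbers = get_full_year(gender_number, year_number)
--         if is_leap_year(year_in_4_numbers) and 0 < day_number < 30: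
--             return True
--         else:
--             if 0 < day_number < 29:
--                 return True
--             return False
--     else:
--         return False
-- ===== SOURCE B (Python) =====
-- def is_valid_day_number(gender_number: int, year_number: int, month_number: int, day_number: int) -> bool:
--     """Check if given value is correct for day number in ID code."""
--     if not (1 <= gender_number <= 6 and 0 <= year_number <= 99 and 1 <= month_number <= 12):
--         return False
--     days = [31, 28, 31, 30, 31, 30, 31, 31, 30, 31, 30, 31]
--     full_year = 1800 + 100 * ((gender_number - 1) // 2) + year_number
--     if full_year % 4 == 0 and (full_year % 100 != 0 or full_year % 400 == 0):
--         days[1] = 29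
--     return 1 <= day_number <= days[month_number - 1]
-- ===== Notes on version B (the rewrite author's own statement) =====
-- stated objective: simpler
-- what changed: Replaced the two list scans plus leap fall-through with a single guard, a days-per-month table (February bumped to 29 in leap years) and one indexed bounds check; full year computed arithmetically via (g-1)//2 instead of an if-chain.
import Mathlib
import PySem

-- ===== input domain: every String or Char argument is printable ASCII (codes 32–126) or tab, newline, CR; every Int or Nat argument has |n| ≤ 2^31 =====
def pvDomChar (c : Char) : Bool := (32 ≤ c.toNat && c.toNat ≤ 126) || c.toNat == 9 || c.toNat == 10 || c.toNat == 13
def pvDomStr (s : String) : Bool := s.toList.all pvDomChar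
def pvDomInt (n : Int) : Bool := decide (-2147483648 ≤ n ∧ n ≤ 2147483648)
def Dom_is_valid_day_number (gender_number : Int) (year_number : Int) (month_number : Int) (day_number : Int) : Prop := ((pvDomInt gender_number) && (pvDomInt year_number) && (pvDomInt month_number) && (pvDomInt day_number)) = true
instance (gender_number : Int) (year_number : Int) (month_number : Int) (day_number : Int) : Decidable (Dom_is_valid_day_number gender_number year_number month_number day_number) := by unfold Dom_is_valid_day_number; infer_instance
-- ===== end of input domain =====

-- B replaces A's two month-list scans and leap fall-through with a days-per-month table
-- (February set to 29 in leap years) and one indexed bounds check; same return value everywhere.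

-- ===== PORT A =====
def pyIsValidGenderNumber (gender_number : Int) : Bool :=
  if gender_number < 1 || gender_number > 6 then false else true

def pyIsValidYearNumber (year_number : Int) : Bool :=
  if -1 < year_number && year_number < 100 then true else false

def pyIsValidMonthNumber (month_number : Int) : Bool :=
  if 0 < month_number && month_number < 13 then true else false

def pyIsLeapYear (year_number : Int) : Bool :=
  if PySem.Int.mod year_number 400 = 0 then true
  else if PySem.Int.mod year_number 4 = 0 && !(PySem.Int.mod year_number 100 = 0) then true
  else if PySem.Int.mod year_number 100 = 0 && PySem.Int.mod year_number 400 ≠ 0 then false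
  else false

-- Python's get_full_year falls through (returns None) for other gender numbers; that branch is
-- unreachable in is_valid_day_number (gender already validated), ported as 0.
def pyGetFullYear (gender_number : Int) (year_number : Int) : Int :=
  if gender_number = 1 || gender_number = 2 then 1800 + year_number
  else if gender_number = 3 || gender_number = 4 then 1900 + year_number
  else if gender_number = 5 || gender_number = 6 then 2000 + year_number
  else 0

def is_valid_day_number (gender_number : Int) (year_number : Int) (month_number : Int) (day_number : Int) : Bool :=
  if pyIsValidGenderNumber gender_number && pyIsValidYearNumber year_number && pyIsValidMonthNumber month_number then
    -- loop over days_in_month_31: return True at the first index whose condition holds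
    if ([1, 3, 5, 7, 8, 10, 12] : List Int).any (fun e => month_number == e && (0 < day_number && day_number < 32)) then true
    else if ([4, 6, 9, 11] : List Int).any (fun e => month_number == e && (0 < day_number && day_number < 31)) then true
    else
      let year_in_4_numbers := pyGetFullYear gender_number year_number
      if pyIsLeapYear year_in_4_numbers && (0 < day_number && day_number < 30) then true
      else if 0 < day_number && day_number < 29 then true
      else false
  else false

-- ===== PORT B =====
def daysInMonthTable : List Int := [31, 28, 31, 30, 31, 30, 31, 31, 30, 31, 30, 31]

def is_valid_day_number_alt (gender_number : Int) (year_number : Int) (month_number : Int) (day_number : Int) : Bool :=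
  if !(1 ≤ gender_number && gender_number ≤ 6 && (0 ≤ year_number && year_number ≤ 99) && (1 ≤ month_number && month_number ≤ 12)) then
    false
  else
    let full_year := 1800 + 100 * PySem.Int.floordiv (gender_number - 1) 2 + year_number
    let days :=
      if PySem.Int.mod full_year 4 = 0 && (PySem.Int.mod full_year 100 ≠ 0 || PySem.Int.mod full_year 400 = 0) then
        PySem.List.pySetD daysInMonthTable 1 29
      else daysInMonthTable
    1 ≤ day_number && day_number ≤ PySem.List.pyGetD days (month_number - 1) 0

-- ===== PRECONDITION & SPEC =====
def Spec_is_valid_day_number (gender_number : Int) (year_number : Int) (month_number : Int) (day_number : Int) (out : Bool) : Prop := out = is_valid_day_number_alt gender_number year_number month_number day_number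
instance (gender_number : Int) (year_number : Int) (month_number : Int) (day_number : Int) (out : Bool) : Decidable (Spec_is_valid_day_number gender_number year_number month_number day_number out) := by unfold Spec_is_valid_day_number; infer_instance

-- ===== CLAIM (what is proved, stated in full; the proofs are below) =====
def Claim_equal_is_valid_day_number : Prop := ∀ (gender_number : Int) (year_number : Int) (month_number : Int) (day_number : Int), Dom_is_valid_day_number gender_number year_number month_number day_number → Spec_is_valid_day_number gender_number year_number month_number day_number (is_valid_day_number gender_number year_number month_number day_number)

-- ===== LEMMAS AND PROOFS =====

lemma floordiv_lit (g : Int) (h1 : 1 ≤ g) (h2 : g ≤ 6) :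
    PySem.Int.floordiv (g - 1) 2 = (if g ≤ 2 then 0 else if g ≤ 4 then 1 else 2) := by
  interval_cases g
  all_goals decide

lemma fullyear_eq (g y : Int) (h1 : 1 ≤ g) (h2 : g ≤ 6) :
    pyGetFullYear g y = 1800 + 100 * PySem.Int.floordiv (g - 1) 2 + y := by
  rw [floordiv_lit g h1 h2]
  unfold pyGetFullYear
  interval_cases g
  all_goals norm_num

lemma leap_eq (x : Int) : pyIsLeapYear x =
    (decide (PySem.Int.mod x 4 = 0) && (decide (PySem.Int.mod x 100 ≠ 0) || decide (PySem.Int.mod x 400 = 0))) := by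
  simp only [pyIsLeapYear, ne_eq, PySem.Int.mod_eq_zero_iff_dvd]
  split_ifs <;> simp_all
  all_goals omega

lemma body_eq (g y m d : Int) (hg : 1 ≤ g) (hg2 : g ≤ 6) (hy : 0 ≤ y) (hy2 : y ≤ 99)
    (hm : 1 ≤ m) (hm2 : m ≤ 12) :
    is_valid_day_number g y m d = is_valid_day_number_alt g y m d := by
  unfold is_valid_day_number is_valid_day_number_alt
  have hga : pyIsValidGenderNumber g = true := by simp [pyIsValidGenderNumber]; omega
  have hya : pyIsValidYearNumber y = true := by simp [pyIsValidYearNumber]; omega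
  have hma : pyIsValidMonthNumber m = true := by simp [pyIsValidMonthNumber]; omega
  have hgb : (!(decide (1 ≤ g) && decide (g ≤ 6) && (decide (0 ≤ y) && decide (y ≤ 99)) && (decide (1 ≤ m) && decide (m ≤ 12)))) = false := by
    simp; omega
  rw [hga, hya, hma, hgb]
  simp only [leap_eq, fullyear_eq g y hg hg2, Bool.and_self, if_true, Bool.false_eq_true, if_false]
  generalize (1800 + 100 * PySem.Int.floordiv (g - 1) 2 + y) = F
  cases hb : (decide (PySem.Int.mod F 4 = 0) && (decide (PySem.Int.mod F 100 ≠ 0) || decide (PySem.Int.mod F 400 = 0))) <;>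
    interval_cases m <;>
      simp [daysInMonthTable, PySem.List.pySetD, PySem.List.pySet?, PySem.List.pyGetD,
        PySem.List.pyGet?, PySem.List.pyIdx?] <;>
      (rw [Bool.eq_iff_iff]; simp only [Bool.and_eq_true, Bool.or_eq_true, decide_eq_true_eq]; omega)

lemma body_false (g y m d : Int)
    (h : ¬(1 ≤ g ∧ g ≤ 6 ∧ 0 ≤ y ∧ y ≤ 99 ∧ 1 ≤ m ∧ m ≤ 12)) :
    is_valid_day_number g y m d = is_valid_day_number_alt g y m d := by
  have hA : is_valid_day_number g y m d = false := by
    unfold is_valid_day_number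
    rw [if_neg]
    simp [pyIsValidGenderNumber, pyIsValidYearNumber, pyIsValidMonthNumber]
    omega
  have hB : is_valid_day_number_alt g y m d = false := by
    unfold is_valid_day_number_alt
    rw [if_pos]
    simp
    omega
  rw [hA, hB]

-- ===== VERDICT (by name: the statement is the Claim_ definition above) =====
theorem is_valid_day_number_spec : Claim_equal_is_valid_day_number := by
  intro g y m d _
  unfold Spec_is_valid_day_number
  by_cases h : 1 ≤ g ∧ g ≤ 6 ∧ 0 ≤ y ∧ y ≤ 99 ∧ 1 ≤ m ∧ m ≤ 12
  · exact body_eq g y m d h.1 h.2.1 h.2.2.1 h.2.2.2.1 h.2.2.2.2.1 h.2.2.2.2.2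
  · exact body_false g y m d h
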